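-- pv_equiv track=rewrite | github.com/JazonJiao/Brilliant-problems | Array7.py | generateComb
-- ===== SOURCE A (Python) =====
-- def generateComb(n=12):
--     b = []
--     for i in range(n):
--         for j in range(i+1, n):
--             for k in range(j+1, n):
--                 for l in range(k+1, n):
--                     for m in range(l+1, n):
--                         for o in range(m+1, n):
--                             a = [True] * n
--                             a[i] = False
--                             a[j] = False
--                             a[k] = False
--                             a[l] = False
--                             a[m] = False
--                             a[o] = False
--                             b.append(a)
--     return b
-- ===== SOURCE B (Python) =====
-- def _go(n, start, rem, cur, out):
--     if rem == 0:
--         out.append(cur + [True] * (n - start))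
--         return
--     for p in range(start, n - rem + 1):
--         _go(n, p + 1, rem - 1, cur + [True] * (p - start) + [False], out)
--
--
-- def generateComb(n=12):
--     out = []
--     _go(n, 0, 6, [], out)
--     return out
-- ===== Notes on version B (the rewrite author's own statement) =====
-- stated objective: alternative
-- what changed: Replaced the six hard-coded nested index loops (each building a row by assigning into an all-True array) with a single recursive generator parameterised by the number of False positions still to place, which extends a partial row by a True-run plus a False per chosen position; same C(n,6) rows in the same lexicographic order.
import Mathlib
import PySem

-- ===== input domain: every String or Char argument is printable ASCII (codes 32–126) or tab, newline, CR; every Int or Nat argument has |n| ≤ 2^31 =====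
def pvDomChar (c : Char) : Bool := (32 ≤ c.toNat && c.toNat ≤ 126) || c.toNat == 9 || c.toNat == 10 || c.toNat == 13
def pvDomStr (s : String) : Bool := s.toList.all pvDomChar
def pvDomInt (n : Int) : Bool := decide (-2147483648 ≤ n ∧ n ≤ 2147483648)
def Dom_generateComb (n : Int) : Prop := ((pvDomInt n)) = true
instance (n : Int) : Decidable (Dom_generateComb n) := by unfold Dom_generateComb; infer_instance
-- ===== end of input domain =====

-- B replaces A's six hard-coded nested index loops (index assignment into an
-- all-True array) by one recursive generator over the remaining count of False
-- positions, extending a partial row segment by segment; same output, same order.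

-- ===== PORT A =====
-- a[i] = False is ported as pySetD (total form); every index assigned is an
-- element of range(n), hence in range, where pySetD is exact.
def generateComb (n : Int) : List (List Bool) :=
  (PySem.List.pyRange 0 n 1).foldl (fun b i =>
    (PySem.List.pyRange (i+1) n 1).foldl (fun b j =>
      (PySem.List.pyRange (j+1) n 1).foldl (fun b k =>
        (PySem.List.pyRange (k+1) n 1).foldl (fun b l =>
          (PySem.List.pyRange (l+1) n 1).foldl (fun b m =>
            (PySem.List.pyRange (m+1) n 1).foldl (fun b o =>
              b ++ [PySem.List.pySetD (PySem.List.pySetD (PySem.List.pySetD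
                     (PySem.List.pySetD (PySem.List.pySetD (PySem.List.pySetD
                       (List.replicate n.toNat true) i false) j false) k false)
                     l false) m false) o false]) b) b) b) b) b) []

-- ===== PORT B =====
-- the recursive generator _go(n, start, rem, cur, out) of Source B;
-- [True] * k is ported as List.replicate k.toNat true (exact: empty for k < 0)
def generateComb_alt_go (n start : Int) (rem : Nat) (cur : List Bool)
    (out : List (List Bool)) : List (List Bool) :=
  if rem = 0 then out ++ [cur ++ List.replicate (n - start).toNat true]
  else
    (PySem.List.pyRange start (n - rem + 1) 1).foldl
      (fun out p =>
        generateComb_alt_go n (p+1) (rem-1)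
          (cur ++ List.replicate (p - start).toNat true ++ [false]) out) out
termination_by rem
decreasing_by omega

def generateComb_alt (n : Int) : List (List Bool) :=
  generateComb_alt_go n 0 6 [] []

-- ===== PRECONDITION & SPEC =====
def Spec_generateComb (n : Int) (out : List (List Bool)) : Prop := out = generateComb_alt n
instance (n : Int) (out : List (List Bool)) : Decidable (Spec_generateComb n out) := by unfold Spec_generateComb; infer_instance

-- ===== CLAIM (what is proved, stated in full; the proofs are below) =====
def Claim_equal_generateComb : Prop := ∀ (n : Int), Dom_generateComb n → Spec_generateComb n (generateComb n)

-- ===== LEMMAS AND PROOFS =====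

-- all boolean lists of length `len` containing exactly `rem` falses, in the
-- order B enumerates them (false branch first)
def pvMasks (len rem : Nat) : List (List Bool) :=
  match rem, len with
  | 0, len => [List.replicate len true]
  | _+1, 0 => []
  | rem+1, len+1 =>
      (pvMasks len rem).map (false :: ·) ++ (pvMasks len (rem+1)).map (true :: ·)

-- all strictly increasing k-tuples of positions in [lo, n), in the order A's
-- nested loops enumerate them
def pvCombs (k : Nat) (lo n : Int) : List (List Int) :=
  match k with
  | 0 => [[]]
  | k+1 => (PySem.List.pyRange lo n 1).flatMap (fun i => (pvCombs k (i+1) n).map (i :: ·))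

theorem pvFlatMap_congr {α β : Type} {l : List α} {f g : α → List β}
    (h : ∀ x ∈ l, f x = g x) : l.flatMap f = l.flatMap g := by
  simp only [List.flatMap_def]
  rw [List.map_congr_left h]

theorem pvMasks_nil : ∀ (len rem : Nat), len < rem → pvMasks len rem = [] := by
  intro len
  induction len with
  | zero => intro rem h; match rem, h with | r+1, _ => rfl
  | succ l ih =>
      intro rem h
      match rem, h with
      | r+1, h =>
        simp [pvMasks, ih r (by omega), ih (r+1) (by omega)]

theorem pvMasks_expand (len rem : Nat) :
    pvMasks len (rem+1) =
      (List.range len).flatMap (fun p =>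
        (pvMasks (len - (p+1)) rem).map (fun t => List.replicate p true ++ false :: t)) := by
  induction len with
  | zero => rfl
  | succ l ih =>
      rw [List.range_succ_eq_map]
      simp only [List.flatMap_cons, List.flatMap_map]
      rw [pvMasks]
      congr 1
      rw [ih]
      simp only [List.map_flatMap, List.map_map]
      apply pvFlatMap_congr
      intro p hp
      have : l + 1 - (p + 1 + 1) = l - (p + 1) := by omega
      rw [this]
      apply List.map_congr_left
      intro t _
      simp [List.replicate_succ]

theorem pvGo_eq (n : Int) : ∀ (rem : Nat) (start : Int) (cur : List Bool)
    (out : List (List Bool)),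
    generateComb_alt_go n start rem cur out
      = out ++ (pvMasks (n - start).toNat rem).map (cur ++ ·) := by
  intro rem
  induction rem with
  | zero =>
      intro start cur out
      rw [generateComb_alt_go]
      simp [pvMasks]
  | succ r ih =>
      intro start cur out
      rw [generateComb_alt_go]
      simp only [Nat.succ_ne_zero, if_false, Nat.add_sub_cancel]
      have hb : (fun (out : List (List Bool)) (p : Int) =>
            generateComb_alt_go n (p+1) r
              (cur ++ List.replicate (p - start).toNat true ++ [false]) out)
          = (fun out p => out ++
              (pvMasks (n - (p+1)).toNat r).map
                ((cur ++ List.replicate (p - start).toNat true ++ [false]) ++ ·)) := by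
        funext out p
        exact ih (p+1) (cur ++ List.replicate (p - start).toNat true ++ [false]) out
      rw [hb, PySem.List.foldl_append_eq_flatMap]
      congr 1
      have harg : n - (r + 1 : Nat) + 1 = n - r := by push_cast; ring
      rw [harg, pvMasks_expand, List.map_flatMap, PySem.List.pyRange_one,
        List.flatMap_map]
      by_cases h : start ≤ n - r
      · have hm : (n - start).toNat = (n - r - start).toNat + r := by omega
        rw [hm, List.range_add, List.flatMap_append, List.flatMap_map]
        have hz : (List.range r).flatMap
            (fun j => List.map (cur ++ ·)
              (List.map (fun t => List.replicate ((n - r - start).toNat + j) true ++ false :: t)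
                (pvMasks ((n - r - start).toNat + r - ((n - r - start).toNat + j + 1)) r)))
            = (List.range r).flatMap (fun _ => ([] : List (List Bool))) := by
          apply pvFlatMap_congr
          intro j hj
          rw [List.mem_range] at hj
          rw [pvMasks_nil _ r (by omega)]
          simp
        rw [hz]
        have hnil : (List.range r).flatMap (fun _ => ([] : List (List Bool))) = [] := by
          simp
        rw [hnil, List.append_nil]
        apply pvFlatMap_congr
        intro q hq
        rw [List.mem_range] at hq
        have h1 : (start + (q : Int) - start).toNat = q := by omega
        have h2 : (n - (start + (q : Int) + 1)).toNat
            = (n - r - start).toNat + r - (q + 1) := by omega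
        rw [h1, h2, List.map_map]
        apply List.map_congr_left
        intro t _
        simp
      · have h0 : ((n - (r : Int) - start).toNat : Nat) = 0 := by omega
        rw [h0]
        have hz : ∀ a ∈ List.range (n - start).toNat,
            (List.map (fun x => cur ++ x)
              (List.map (fun t => List.replicate a true ++ false :: t)
                (pvMasks ((n - start).toNat - (a+1)) r))) = ([] : List (List Bool)) := by
          intro a ha
          rw [List.mem_range] at ha
          rw [pvMasks_nil _ r (by omega)]
          simp
        rw [pvFlatMap_congr hz]
        simp

theorem pvSet_take (c : List Bool) (j : Nat) (hj : j < c.length) :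
    (c.set j false).take (j+1) = c.take j ++ [false] := by
  rw [List.take_set, List.take_add_one, List.getElem?_eq_getElem hj, List.set_append]
  have h0 : j - min j c.length = 0 := by omega
  simp [h0]

theorem pvCombs_masks : ∀ (k : Nat) (lo n : Int) (c : List Bool),
    0 ≤ lo → lo ≤ n → c.length = n.toNat →
    c.drop lo.toNat = List.replicate (n - lo).toNat true →
    (pvCombs k lo n).map (fun ps => ps.foldl (fun a p => PySem.List.pySetD a p false) c)
      = (pvMasks (n - lo).toNat k).map (fun t => c.take lo.toNat ++ t) := by
  intro k
  induction k with
  | zero =>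
      intro lo n c h0 hlon hlen hdrop
      simp only [pvCombs, pvMasks, List.map_cons, List.map_nil, List.foldl_nil]
      rw [← hdrop, List.take_append_drop]
  | succ k ih =>
      intro lo n c h0 hlon hlen hdrop
      rw [pvCombs]
      simp only [List.map_flatMap, List.map_map]
      rw [PySem.List.pyRange_one, List.flatMap_map, pvMasks_expand]
      simp only [List.map_flatMap, List.map_map]
      apply pvFlatMap_congr
      intro p hp
      rw [List.mem_range] at hp
      have hpn : (p : Int) < n - lo := by omega
      have hiN : (lo + (p : Int)).toNat = lo.toNat + p := by omega
      have hiN1 : (lo + (p : Int) + 1).toNat = lo.toNat + p + 1 := by omega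
      have hset : PySem.List.pySetD c (lo + (p : Int)) false
          = c.set (lo.toNat + p) false := by
        rw [PySem.List.pySetD_of_nonneg _ _ (by omega : (0:Int) ≤ lo + (p:Int)), hiN]
      have hlen' : (c.set (lo.toNat + p) false).length = n.toNat := by
        simpa using hlen
      have hlt : lo.toNat + p < c.length := by omega
      have hdrop' : (c.set (lo.toNat + p) false).drop (lo + (p : Int) + 1).toNat
          = List.replicate (n - (lo + (p : Int) + 1)).toNat true := by
        rw [hiN1, List.drop_set, if_pos (by omega)]
        have : lo.toNat + p + 1 = lo.toNat + (p + 1) := by omega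
        rw [this, ← List.drop_drop, hdrop, List.drop_replicate]
        congr 1
        omega
      have hIH := ih (lo + (p : Int) + 1) n (c.set (lo.toNat + p) false)
        (by omega) (by omega) hlen' hdrop'
      simp only [Function.comp_def, List.foldl_cons, hset]
      rw [hIH]
      have htake : (c.set (lo.toNat + p) false).take (lo + (p : Int) + 1).toNat
          = c.take lo.toNat ++ List.replicate p true ++ [false] := by
        rw [hiN1, pvSet_take c (lo.toNat + p) hlt, List.take_add, hdrop,
          List.take_replicate, Nat.min_eq_left (by omega : p ≤ (n - lo).toNat)]
      rw [htake]
      have hmk : (n - (lo + (p : Int) + 1)).toNat = (n - lo).toNat - (p + 1) := by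
        omega
      rw [hmk]
      apply List.map_congr_left
      intro t _
      simp

theorem pvA_unfold (n : Int) :
    generateComb n = (pvCombs 6 0 n).map
      (fun ps => ps.foldl (fun a p => PySem.List.pySetD a p false)
        (List.replicate n.toNat true)) := by
  simp only [generateComb, PySem.List.foldl_append_singleton_eq_map,
    PySem.List.foldl_append_eq_flatMap, List.nil_append, pvCombs,
    List.map_flatMap, List.map_map, List.map_cons, List.map_nil,
    Function.comp_def, List.foldl_cons, List.foldl_nil, ← List.map_eq_flatMap]

-- ===== VERDICT (by name: the statement is the Claim_ definition above) =====
theorem generateComb_spec : Claim_equal_generateComb := by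
  intro n _
  unfold Spec_generateComb generateComb_alt
  by_cases hn : 0 ≤ n
  · rw [pvA_unfold,
      pvCombs_masks 6 0 n (List.replicate n.toNat true) le_rfl hn
        (by simp) (by simp),
      pvGo_eq n 6 0 [] []]
    simp
  · rw [pvA_unfold, pvGo_eq n 6 0 [] []]
    have h1 : PySem.List.pyRange 0 n 1 = [] := PySem.List.pyRange_one_eq_nil (by omega)
    simp [pvCombs, h1, pvMasks_nil n.toNat 6 (by omega)]
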